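-- pv_equiv track=rewrite | github.com/mcjon3z/legion | app/scheduler/providers.py | _expand_unavailable_tool_ids
-- ===== SOURCE A (Python) =====
-- from typing import Any, Dict, List, Optional, Set, Tuple
--
-- def _expand_unavailable_tool_ids(values: Any) -> List[str]:
--     expanded = set()
--     for item in list(values or []):
--         token = _normalize_tool_token(item)
--         if not token:
--             continue
--         expanded.add(token)
--         if token in {"whatweb", "whatweb-http", "whatweb-https"}:
--             expanded.update({"whatweb", "whatweb-http", "whatweb-https"})
--         if token.endswith(".nse"):
--             expanded.add("nmap")
--     return sorted(expanded)
--
-- def _normalize_tool_token(value: Any) -> str: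
--     return str(value or "").strip().lower()
-- ===== SOURCE B (Python) =====
-- def _insert_sorted(out, t):
--     # insert t into the sorted duplicate-free list out, keeping it sorted and duplicate-free
--     i = 0
--     n = len(out)
--     while i < n and out[i] < t:
--         i += 1
--     if i < n and out[i] == t:
--         return out
--     return out[:i] + [t] + out[i:]
--
-- def _expand_unavailable_tool_ids(values):
--     out = []  # always sorted and duplicate-free; returned as-is, no final sort
--     for item in list(values or []):
--         token = str(item or "").strip().lower()
--         if not token:
--             continue
--         out = _insert_sorted(out, token)
--         if token in ("whatweb", "whatweb-http", "whatweb-https"):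
--             for w in ("whatweb", "whatweb-http", "whatweb-https"):
--                 out = _insert_sorted(out, w)
--         if token.endswith(".nse"):
--             out = _insert_sorted(out, "nmap")
--     return out
-- ===== Notes on version B (the rewrite author's own statement) =====
-- stated objective: alternative
-- what changed: B drops the hash set and the final sort entirely: it maintains a sorted duplicate-free output list throughout, adding each token and each expansion by ordered insertion, and returns the list as-is.
import Mathlib
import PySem

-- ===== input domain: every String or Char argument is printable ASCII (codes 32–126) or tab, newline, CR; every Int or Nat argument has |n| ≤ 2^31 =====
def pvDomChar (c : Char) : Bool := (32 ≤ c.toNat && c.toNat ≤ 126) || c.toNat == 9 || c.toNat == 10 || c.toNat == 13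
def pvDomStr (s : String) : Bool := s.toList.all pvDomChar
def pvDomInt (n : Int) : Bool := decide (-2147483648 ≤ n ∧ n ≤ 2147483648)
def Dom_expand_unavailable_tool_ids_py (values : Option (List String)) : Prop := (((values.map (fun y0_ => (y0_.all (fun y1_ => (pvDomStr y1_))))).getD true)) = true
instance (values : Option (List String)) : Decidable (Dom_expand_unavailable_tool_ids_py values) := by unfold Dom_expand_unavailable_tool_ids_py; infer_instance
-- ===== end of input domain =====

-- B replaces A's hash set + final sort by a sorted duplicate-free output list maintained
-- throughout via ordered insertion and returned as-is (objective: alternative).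

-- ===== PORT A =====
-- _normalize_tool_token(value): str(value or "").strip().lower(); on a str argument
-- 'value or ""' is value when non-empty and "" otherwise, and str() is the identity.
def pvNormalizeToolToken (value : String) : String :=
  PySem.Str.lower (PySem.Str.strip (if value == "" then "" else value))

-- the loop body of A; the set literal {"whatweb","whatweb-http","whatweb-https"} is
-- consumed only by membership and set.update, so its hash iteration order cannot matter
def pvStepA (s : PySem.Set String) (item : String) : PySem.Set String :=
  let token := pvNormalizeToolToken item
  if token = "" then s
  else
    let s1 := PySem.Set.add s token
    let s2 := if token ∈ ["whatweb", "whatweb-http", "whatweb-https"]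
              then PySem.Set.update s1 ["whatweb", "whatweb-http", "whatweb-https"] else s1
    if PySem.Str.endswith token ".nse" then PySem.Set.add s2 "nmap" else s2

def expand_unavailable_tool_ids_py (values : Option (List String)) : List String :=
  let expanded : PySem.Set String := (values.getD []).foldl pvStepA PySem.Set.empty
  PySem.List.sorted expanded (fun x => x) false

-- ===== PORT B =====
-- _insert_sorted(out, t): the while loop skips the prefix of elements < t, then either
-- finds t already present or splices it in; transliterated as structural recursion.
def pvIns (out : List String) (t : String) : List String :=
  match out with
  | [] => [t]
  | x :: xs => if x < t then x :: pvIns xs t else if x = t then x :: xs else t :: x :: xs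

-- one iteration of B's loop over the items
def pvStepBalt (out : List String) (item : String) : List String :=
  let token := PySem.Str.lower (PySem.Str.strip (if item == "" then "" else item))
  if token = "" then out
  else
    let o1 := pvIns out token
    let o2 := if token ∈ ["whatweb", "whatweb-http", "whatweb-https"]
              then ["whatweb", "whatweb-http", "whatweb-https"].foldl pvIns o1 else o1
    if PySem.Str.endswith token ".nse" then pvIns o2 "nmap" else o2

def expand_unavailable_tool_ids_py_alt (values : Option (List String)) : List String :=
  (values.getD []).foldl pvStepBalt []

-- ===== PRECONDITION & SPEC =====
def Spec_expand_unavailable_tool_ids_py (values : Option (List String)) (out : List String) : Prop := out = expand_unavailable_tool_ids_py_alt values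
instance (values : Option (List String)) (out : List String) : Decidable (Spec_expand_unavailable_tool_ids_py values out) := by unfold Spec_expand_unavailable_tool_ids_py; infer_instance

-- ===== CLAIM (what is proved, stated in full; the proofs are below) =====
def Claim_equal_expand_unavailable_tool_ids_py : Prop := ∀ (values : Option (List String)), Dom_expand_unavailable_tool_ids_py values → Spec_expand_unavailable_tool_ids_py values (expand_unavailable_tool_ids_py values)

-- ===== LEMMAS AND PROOFS =====

-- shorthand used only in the proofs
def pvW : List String := ["whatweb", "whatweb-http", "whatweb-https"]

def pvNorm (item : String) : String :=
  PySem.Str.lower (PySem.Str.strip (if item == "" then "" else item))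

-- what one iteration of either loop contributes, as a predicate on the element x
def pvQ (item : String) (x : String) : Prop :=
  (pvNorm item = x ∧ x ≠ "") ∨ (x ∈ pvW ∧ pvNorm item ∈ pvW) ∨
  (x = "nmap" ∧ PySem.Str.endswith (pvNorm item) ".nse" = true ∧ pvNorm item ≠ "")

theorem pvW_no_nse : ∀ w ∈ pvW, PySem.Str.endswith w ".nse" = false := by decide

theorem norm_empty_not_W : ("" : String) ∉ pvW := by decide

theorem mem_stepA (s : PySem.Set String) (item : String) (x : String) :
    x ∈ pvStepA s item ↔ x ∈ s ∨ pvQ item x := by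
  have hn : pvNormalizeToolToken item = pvNorm item := rfl
  simp only [pvStepA, hn, pvQ]
  split_ifs with h1 h2 h3 h3
  · constructor
    · intro hx; exact Or.inl hx
    · rintro (hx | ⟨he, hne⟩ | ⟨_, hw⟩ | ⟨_, _, hne⟩)
      · exact hx
      · exact absurd (h1 ▸ he).symm hne
      · exact absurd (h1 ▸ hw) norm_empty_not_W
      · exact absurd h1 hne
  · have hf := pvW_no_nse _ h3
    rw [h2] at hf
    exact Bool.noConfusion hf
  · simp only [PySem.Set.mem_add]
    constructor
    · rintro ((hs | hx) | hnm)
      · exact Or.inl hs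
      · exact Or.inr (Or.inl ⟨hx.symm, hx ▸ h1⟩)
      · exact Or.inr (Or.inr (Or.inr ⟨hnm, h2, h1⟩))
    · rintro (hs | (⟨he, _⟩ | ⟨_, hw⟩ | ⟨hx, _, _⟩))
      · exact Or.inl (Or.inl hs)
      · exact Or.inl (Or.inr he.symm)
      · exact absurd hw h3
      · exact Or.inr hx
  · simp only [PySem.Set.mem_update, PySem.Set.mem_add]
    constructor
    · rintro ((hs | hx) | hw)
      · exact Or.inl hs
      · exact Or.inr (Or.inl ⟨hx.symm, hx ▸ h1⟩)
      · exact Or.inr (Or.inr (Or.inl ⟨hw, h3⟩))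
    · rintro (hs | (⟨he, _⟩ | ⟨hxw, _⟩ | ⟨_, hnse, _⟩))
      · exact Or.inl (Or.inl hs)
      · exact Or.inl (Or.inr he.symm)
      · exact Or.inr hxw
      · rw [hnse] at h2; exact absurd rfl h2
  · simp only [PySem.Set.mem_add]
    constructor
    · rintro (hs | hx)
      · exact Or.inl hs
      · exact Or.inr (Or.inl ⟨hx.symm, hx ▸ h1⟩)
    · rintro (hs | (⟨he, _⟩ | ⟨_, hw⟩ | ⟨_, hnse, _⟩))
      · exact Or.inl hs
      · exact Or.inr he.symm
      · exact absurd hw h3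
      · rw [hnse] at h2; exact absurd rfl h2

theorem mem_foldA (xs : List String) (s : PySem.Set String) (x : String) :
    x ∈ xs.foldl pvStepA s ↔ x ∈ s ∨ ∃ item ∈ xs, pvQ item x := by
  induction xs generalizing s with
  | nil => simp
  | cons a t ih =>
    simp only [List.foldl_cons, ih, mem_stepA, List.mem_cons]
    constructor
    · rintro ((hs | hq) | ⟨i, hi, hq⟩)
      · exact Or.inl hs
      · exact Or.inr ⟨a, Or.inl rfl, hq⟩
      · exact Or.inr ⟨i, Or.inr hi, hq⟩
    · rintro (hs | ⟨i, (rfl | hi), hq⟩)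
      · exact Or.inl (Or.inl hs)
      · exact Or.inl (Or.inr hq)
      · exact Or.inr ⟨i, hi, hq⟩

theorem nodup_foldA (xs : List String) (s : PySem.Set String) (hs : s.Nodup) :
    (xs.foldl pvStepA s).Nodup := by
  induction xs generalizing s with
  | nil => exact hs
  | cons a t ih =>
    rw [List.foldl_cons]
    apply ih
    simp only [pvStepA]
    split_ifs <;>
      first
        | exact hs
        | exact PySem.Set.nodup_add _ _ hs
        | exact PySem.Set.nodup_add _ _ (PySem.Set.nodup_add _ _ hs)
        | exact PySem.Set.nodup_add _ _ (PySem.Set.nodup_update _ _ (PySem.Set.nodup_add _ _ hs))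
        | exact PySem.Set.nodup_update _ _ (PySem.Set.nodup_add _ _ hs)

-- B side: ordered insertion keeps membership and strict sortedness
theorem mem_ins (l : List String) (t x : String) :
    x ∈ pvIns l t ↔ x = t ∨ x ∈ l := by
  induction l with
  | nil => simp [pvIns]
  | cons a l ih =>
    simp only [pvIns]
    split_ifs with h1 h2 <;> (try subst h2) <;> simp only [List.mem_cons, ih] <;> tauto

theorem pairwise_ins (l : List String) (t : String) (hl : l.Pairwise (· < ·)) :
    (pvIns l t).Pairwise (· < ·) := by
  induction l with
  | nil => simp [pvIns]
  | cons a l ih =>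
    rw [List.pairwise_cons] at hl
    simp only [pvIns]
    split_ifs with h1 h2
    · rw [List.pairwise_cons]
      refine ⟨?_, ih hl.2⟩
      intro y hy
      rcases (mem_ins l t y).mp hy with rfl | hy
      · exact h1
      · exact hl.1 y hy
    · exact List.pairwise_cons.mpr hl
    · have ht : t < a := lt_of_le_of_ne (le_of_not_gt h1) (fun he => h2 he.symm)
      rw [List.pairwise_cons]
      refine ⟨?_, List.pairwise_cons.mpr hl⟩
      intro y hy
      rcases List.mem_cons.mp hy with rfl | hy
      · exact ht
      · exact ht.trans (hl.1 y hy)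

theorem mem_stepBalt (out : List String) (item : String) (x : String) :
    x ∈ pvStepBalt out item ↔ x ∈ out ∨ pvQ item x := by
  have hn : (PySem.Str.lower (PySem.Str.strip (if item == "" then "" else item))) = pvNorm item := rfl
  simp only [pvStepBalt, hn, pvQ]
  split_ifs with h1 h2 h3 h3
  · constructor
    · intro hx; exact Or.inl hx
    · rintro (hx | ⟨he, hne⟩ | ⟨_, hw⟩ | ⟨_, _, hne⟩)
      · exact hx
      · exact absurd (h1 ▸ he).symm hne
      · exact absurd (h1 ▸ hw) norm_empty_not_W
      · exact absurd h1 hne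
  · have hf := pvW_no_nse _ h3
    rw [h2] at hf
    exact Bool.noConfusion hf
  · rw [mem_ins, mem_ins]
    constructor
    · rintro (rfl | rfl | hx)
      · exact Or.inr (Or.inr (Or.inr ⟨rfl, h2, h1⟩))
      · exact Or.inr (Or.inl ⟨rfl, h1⟩)
      · exact Or.inl hx
    · rintro (hx | ⟨he, _⟩ | ⟨_, hw⟩ | ⟨rfl, -, -⟩)
      · exact Or.inr (Or.inr hx)
      · exact Or.inr (Or.inl he.symm)
      · exact absurd hw h3
      · exact Or.inl rfl
  · simp only [List.foldl_cons, List.foldl_nil, mem_ins]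
    constructor
    · rintro (rfl | rfl | rfl | rfl | hx)
      · exact Or.inr (Or.inr (Or.inl ⟨by decide, h3⟩))
      · exact Or.inr (Or.inr (Or.inl ⟨by decide, h3⟩))
      · exact Or.inr (Or.inr (Or.inl ⟨by decide, h3⟩))
      · exact Or.inr (Or.inl ⟨rfl, h1⟩)
      · exact Or.inl hx
    · rintro (hx | ⟨he, _⟩ | ⟨hw, _⟩ | ⟨-, hnse, -⟩)
      · exact Or.inr (Or.inr (Or.inr (Or.inr hx)))
      · exact Or.inr (Or.inr (Or.inr (Or.inl he.symm)))
      · simp only [pvW, List.mem_cons, List.not_mem_nil, or_false] at hw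
        rcases hw with rfl | rfl | rfl
        · exact Or.inr (Or.inr (Or.inl rfl))
        · exact Or.inr (Or.inl rfl)
        · exact Or.inl rfl
      · rw [hnse] at h2; exact absurd rfl h2
  · rw [mem_ins]
    constructor
    · rintro (rfl | hx)
      · exact Or.inr (Or.inl ⟨rfl, h1⟩)
      · exact Or.inl hx
    · rintro (hx | ⟨he, _⟩ | ⟨_, hw⟩ | ⟨-, hnse, -⟩)
      · exact Or.inr hx
      · exact Or.inl he.symm
      · exact absurd hw h3
      · rw [hnse] at h2; exact absurd rfl h2

theorem pairwise_stepBalt (out : List String) (item : String)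
    (ho : out.Pairwise (· < ·)) : (pvStepBalt out item).Pairwise (· < ·) := by
  simp only [pvStepBalt]
  split_ifs <;>
    first
      | exact ho
      | exact pairwise_ins _ _ ho
      | exact pairwise_ins _ _ (pairwise_ins _ _ ho)
      | exact pairwise_ins _ _ (pairwise_ins _ _ (pairwise_ins _ _ (pairwise_ins _ _ ho)))
      | exact pairwise_ins _ _ (pairwise_ins _ _ (pairwise_ins _ _ (pairwise_ins _ _ (pairwise_ins _ _ ho))))

theorem mem_foldBalt (xs : List String) (out : List String) (x : String) :
    x ∈ xs.foldl pvStepBalt out ↔ x ∈ out ∨ ∃ item ∈ xs, pvQ item x := by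
  induction xs generalizing out with
  | nil => simp
  | cons a t ih =>
    simp only [List.foldl_cons, ih, mem_stepBalt, List.mem_cons]
    constructor
    · rintro ((hs | hq) | ⟨i, hi, hq⟩)
      · exact Or.inl hs
      · exact Or.inr ⟨a, Or.inl rfl, hq⟩
      · exact Or.inr ⟨i, Or.inr hi, hq⟩
    · rintro (hs | ⟨i, (rfl | hi), hq⟩)
      · exact Or.inl (Or.inl hs)
      · exact Or.inl (Or.inr hq)
      · exact Or.inr ⟨i, hi, hq⟩

theorem pairwise_foldBalt (xs : List String) (out : List String)
    (ho : out.Pairwise (· < ·)) : (xs.foldl pvStepBalt out).Pairwise (· < ·) := by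
  induction xs generalizing out with
  | nil => exact ho
  | cons a t ih => rw [List.foldl_cons]; exact ih _ (pairwise_stepBalt _ _ ho)

-- ===== VERDICT (by name: the statement is the Claim_ definition above) =====
theorem expand_unavailable_tool_ids_py_spec : Claim_equal_expand_unavailable_tool_ids_py := by
  intro values _
  unfold Spec_expand_unavailable_tool_ids_py
  have ha : expand_unavailable_tool_ids_py values =
      PySem.List.sorted ((values.getD []).foldl pvStepA PySem.Set.empty) (fun x => x) false := rfl
  have hb : expand_unavailable_tool_ids_py_alt values =
      (values.getD []).foldl pvStepBalt [] := rfl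
  rw [ha, hb]
  have hpw : ((values.getD []).foldl pvStepBalt []).Pairwise (· < ·) :=
    pairwise_foldBalt _ _ List.Pairwise.nil
  refine PySem.List.sorted_eq_of_perm_of_pairwise_lt _ _ _ ?_ hpw
  refine (List.perm_ext_iff_of_nodup (hpw.imp ne_of_lt) (nodup_foldA _ _ List.nodup_nil)).mpr ?_
  intro x
  rw [mem_foldA, mem_foldBalt]
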